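-- pv_equiv track=rewrite | github.com/Nabiz/AoC-2020 | Solutions/day05/part1.py | _binary_chose
-- ===== SOURCE A (Python) =====
-- def _binary_chose(seat, start, end):
--     if start == end:
--         return start
--     else:
--         middle = (end-start)//2 + start
--         if seat[0] in ("F", "L"):
--             return _binary_chose(seat[1:], start, middle)
--         else:
--             return _binary_chose(seat[1:], middle+1, end)
-- ===== SOURCE B (Python) =====
-- def _binary_chose(seat, start, end):
--     i = 0
--     while start != end:
--         middle = (end - start) // 2 + start
--         if seat[i] in ("F", "L"):
--             end = middle
--         else:
--             start = middle + 1
--         i += 1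
--     return start
-- ===== Notes on version B (the rewrite author's own statement) =====
-- stated objective: faster
-- what changed: Replaced the non-tail recursion that slices seat[1:] at every step with a tail-style while-loop keeping an index i into the original string and mutating start/end in place.
import Mathlib
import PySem

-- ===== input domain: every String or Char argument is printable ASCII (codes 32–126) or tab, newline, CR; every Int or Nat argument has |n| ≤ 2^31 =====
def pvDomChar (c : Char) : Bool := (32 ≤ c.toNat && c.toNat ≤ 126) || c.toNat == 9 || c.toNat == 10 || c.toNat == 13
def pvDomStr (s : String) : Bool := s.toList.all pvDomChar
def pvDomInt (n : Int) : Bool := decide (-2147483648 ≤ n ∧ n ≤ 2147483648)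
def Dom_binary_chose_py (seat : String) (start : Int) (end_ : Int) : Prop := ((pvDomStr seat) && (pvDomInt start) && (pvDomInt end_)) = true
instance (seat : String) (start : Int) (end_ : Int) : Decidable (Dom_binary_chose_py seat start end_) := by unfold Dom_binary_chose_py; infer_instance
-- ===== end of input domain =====

-- B replaces A's non-tail recursion on string slices by a tail-recursive loop indexing the
-- original string (objective: no per-step slice copies; same return value, same IndexError points).

-- ===== PORT A =====
-- A recurses on the string: seat[0] is the head (raises IndexError on the empty string —
-- excluded by Pre_; the port returns 0 there), seat[1:] is the tail.
def goA : List Char → Int → Int → Int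
  | s, start, end_ =>
    if start = end_ then start
    else
      let middle := PySem.Int.floordiv (end_ - start) 2 + start
      match s with
      | [] => 0  -- seat[0] raises IndexError here; Pre_ excludes these inputs
      | c :: rest =>
        if c = 'F' ∨ c = 'L' then goA rest start middle
        else goA rest (middle + 1) end_

def binary_chose_py (seat : String) (start : Int) (end_ : Int) : Int :=
  goA seat.toList start end_

-- ===== PORT B =====
-- B's while-loop: index i into the fixed string, state (start, end_) updated in place.
def goB (cs : List Char) (i : Nat) (start : Int) (end_ : Int) : Int :=
  if start = end_ then start
  else
    match h : PySem.List.pyGet? cs (i : Int) with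
    | none => 0  -- seat[i] raises IndexError here; Pre_ excludes these inputs
    | some c =>
      let middle := PySem.Int.floordiv (end_ - start) 2 + start
      if c = 'F' ∨ c = 'L' then goB cs (i + 1) start middle
      else goB cs (i + 1) (middle + 1) end_
termination_by cs.length - i
decreasing_by
  all_goals
    have : i < cs.length := by
      by_contra hge
      rw [PySem.List.pyGet?_natCast] at h
      simp [List.getElem?_eq_none (le_of_not_gt hge)] at h
    omega

def binary_chose_py_alt (seat : String) (start : Int) (end_ : Int) : Int :=
  goB seat.toList 0 start end_

-- ===== PRECONDITION & SPEC =====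
-- The bit a character chooses: F/L halve downward (0), B/R (anything else) upward (1).
def pvBit (c : Char) : Int := if c = 'F' ∨ c = 'L' then 0 else 1
-- Binary value of a prefix, least-significant bit first.
def pvVal (cs : List Char) : Int := cs.foldr (fun c acc => pvBit c + 2 * acc) 0

-- Pre_ admits exactly the inputs on which the Python A returns (no IndexError): the interval
-- [start, end_] collapses after some k ≤ len(seat) steps, which happens iff the binary value
-- of the first k characters satisfies 0 ≤ (end_ - start) - val < 2^k.
def Pre_binary_chose_py (seat : String) (start : Int) (end_ : Int) : Prop :=
  ∃ k ≤ seat.toList.length,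
    0 ≤ end_ - start - pvVal (seat.toList.take k) ∧
    end_ - start - pvVal (seat.toList.take k) < 2 ^ k
instance (seat : String) (start : Int) (end_ : Int) : Decidable (Pre_binary_chose_py seat start end_) := by unfold Pre_binary_chose_py; infer_instance

def pvWitness_binary_chose_py : String × Int × Int := ("FB", 0, 3)

def Spec_binary_chose_py (seat : String) (start : Int) (end_ : Int) (out : Int) : Prop := out = binary_chose_py_alt seat start end_
instance (seat : String) (start : Int) (end_ : Int) (out : Int) : Decidable (Spec_binary_chose_py seat start end_ out) := by unfold Spec_binary_chose_py; infer_instance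

-- ===== CLAIM (what is proved, stated in full; the proofs are below) =====
def Claim_equal_binary_chose_py : Prop := ∀ (seat : String) (start : Int) (end_ : Int), Dom_binary_chose_py seat start end_ → Pre_binary_chose_py seat start end_ → Spec_binary_chose_py seat start end_ (binary_chose_py seat start end_)

-- ===== LEMMAS AND PROOFS =====

-- The loop at index i computes what the recursion computes on the remaining suffix.
theorem goB_eq_goA (cs : List Char) (i : Nat) (start end_ : Int) :
    goB cs i start end_ = goA (cs.drop i) start end_ := by
  rw [goB, goA]
  by_cases hse : start = end_
  · simp [hse]
  · simp only [hse, if_false]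
    rcases h : PySem.List.pyGet? cs (i : Int) with _ | c
    · rw [PySem.List.pyGet?_natCast] at h
      have : cs.length ≤ i := by
        by_contra hlt
        simp [List.getElem?_eq_getElem (lt_of_not_ge hlt)] at h
      simp [List.drop_eq_nil_of_le this]
    · rw [PySem.List.pyGet?_natCast] at h
      have hlt : i < cs.length := by
        by_contra hge
        simp [List.getElem?_eq_none (le_of_not_gt hge)] at h
      have hc : cs[i] = c := by simpa [List.getElem?_eq_getElem hlt] using h
      rw [List.drop_eq_getElem_cons hlt, hc]
      by_cases hb : c = 'F' ∨ c = 'L' <;>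
        simp [hb, goB_eq_goA cs (i + 1) ]
termination_by cs.length - i
decreasing_by
  all_goals omega

-- ===== VERDICT (by name: the statement is the Claim_ definition above) =====
theorem binary_chose_py_spec : Claim_equal_binary_chose_py := by
  intro seat start end_ _ _
  unfold Spec_binary_chose_py binary_chose_py binary_chose_py_alt
  rw [goB_eq_goA]
  rfl
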